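-- pv_equiv track=rewrite | github.com/lbo462/3tca-son-src | test_buttons_as_analog.py | binary_count
-- ===== SOURCE A (Python) =====
-- from typing import List
--
-- def binary_count(number_of_bit: int) -> List[List[int]]:
--     """
--     bit-wise count
--     :return: A list of configurations for the buttons
--     """
--     start = [0 for _ in range(0, number_of_bit)]
--     end = [1 for _ in range(0, number_of_bit)]
--     configurations: List[List[int]] = []
--     current = start.copy()
--     previous = current.copy()
--     while current != end:
--         current = previous.copy()
--         for i, b in enumerate(previous):
--             if b == 0:
--                 # set bit to one and previous ones to zero
--                 for x in range(0, i):
--                     current[x] = 0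
--                 current[i] = 1
--
--                 break
--         previous = current.copy()
--         configurations.append(current.copy())
--     return configurations
-- ===== SOURCE B (Python) =====
-- from typing import List
--
--
-- def binary_count(number_of_bit: int) -> List[List[int]]:
--     """
--     bit-wise count
--     :return: A list of configurations for the buttons
--     """
--     if number_of_bit <= 0:
--         return []
--     return [
--         [(k // 2 ** i) % 2 for i in range(number_of_bit)]
--         for k in range(1, 2 ** number_of_bit)
--     ]
-- ===== Notes on version B (the rewrite author's own statement) =====
-- stated objective: simpler
-- what changed: Replaced the start/end/previous/current ripple-carry state machine with a direct closed form: each configuration k in 1..2**n-1 is built as its little-endian bit list [(k // 2**i) % 2 for i in range(n)], with an explicit empty result for n <= 0.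
import Mathlib
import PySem

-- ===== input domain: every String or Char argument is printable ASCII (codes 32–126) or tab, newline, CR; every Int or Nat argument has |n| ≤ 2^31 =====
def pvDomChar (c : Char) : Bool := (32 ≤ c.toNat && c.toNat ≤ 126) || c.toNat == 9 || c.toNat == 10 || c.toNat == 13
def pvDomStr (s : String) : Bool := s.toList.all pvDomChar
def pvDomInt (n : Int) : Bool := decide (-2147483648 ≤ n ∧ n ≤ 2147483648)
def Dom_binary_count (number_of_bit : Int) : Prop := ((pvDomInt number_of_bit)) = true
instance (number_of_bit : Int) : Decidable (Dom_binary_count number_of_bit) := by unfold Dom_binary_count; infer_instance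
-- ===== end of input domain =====

-- B replaces A's ripple-carry state machine by a closed form: configuration k (1 ≤ k < 2^n)
-- is its little-endian bit list; objective: simpler.


-- ===== PORT A =====
-- index of the first 0 in the list (the enumerate-with-break search)
def pvFirstZero : List Int → Option Nat
  | [] => none
  | b :: rest => if b = 0 then some 0 else (pvFirstZero rest).map (· + 1)

-- one loop body: copy previous, zero the entries before the first 0, set it to 1 (no 0: unchanged)
def pvStep (prev : List Int) : List Int :=
  match pvFirstZero prev with
  | none => prev
  | some i => List.replicate i 0 ++ 1 :: prev.drop (i + 1)

-- the while loop; the fuel only bounds the iteration count (the loop runs at most 2^n - 1 times)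
def pvLoopA : Nat → List Int → List Int → List Int → List (List Int) → List (List Int)
  | 0, _, _, _, configs => configs
  | fuel + 1, ende, current, previous, configs =>
    if current ≠ ende then
      let c := pvStep previous
      pvLoopA fuel ende c c (configs ++ [c])
    else configs

def binary_count (number_of_bit : Int) : List (List Int) :=
  let start := (PySem.List.pyRange 0 number_of_bit 1).map (fun _ => (0 : Int))
  let ende := (PySem.List.pyRange 0 number_of_bit 1).map (fun _ => (1 : Int))
  pvLoopA (2 ^ number_of_bit.toNat) ende start start []

-- ===== PORT B =====
-- in the else-branch number_of_bit > 0, so 2 ** number_of_bit is exactly 2 ^ toNat and the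
-- inner exponent i ≥ 0 by range
def binary_count_alt (number_of_bit : Int) : List (List Int) :=
  if number_of_bit ≤ 0 then []
  else
    (PySem.List.pyRange 1 (2 ^ number_of_bit.toNat) 1).map (fun k =>
      (PySem.List.pyRange 0 number_of_bit 1).map (fun i =>
        PySem.Int.mod (PySem.Int.floordiv k (2 ^ i.toNat)) 2))

-- ===== PRECONDITION & SPEC =====
def Spec_binary_count (number_of_bit : Int) (out : List (List Int)) : Prop := out = binary_count_alt number_of_bit
instance (number_of_bit : Int) (out : List (List Int)) : Decidable (Spec_binary_count number_of_bit out) := by unfold Spec_binary_count; infer_instance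

-- ===== CLAIM (what is proved, stated in full; the proofs are below) =====
def Claim_equal_binary_count : Prop := ∀ (number_of_bit : Int), Dom_binary_count number_of_bit → Spec_binary_count number_of_bit (binary_count number_of_bit)

-- ===== LEMMAS AND PROOFS =====

-- the little-endian bit list of k, n bits wide
def pvBits (n k : Nat) : List Int := (List.range n).map (fun i => ((k / 2 ^ i % 2 : Nat) : Int))

theorem pvBits_zero (n : Nat) : pvBits n 0 = List.replicate n 0 := by
  simp [pvBits]

theorem pvBits_succ (n k : Nat) : pvBits (n + 1) k = ((k % 2 : Nat) : Int) :: pvBits n (k / 2) := by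
  simp [pvBits, List.range_succ_eq_map, List.map_map, Function.comp_def, pow_succ,
    Nat.div_div_eq_div_mul, mul_comm]

theorem pvBits_allones (n k : Nat) (h : pvBits n k = List.replicate n 1) : 2 ^ n - 1 ≤ k := by
  induction n generalizing k with
  | zero => omega
  | succ n ih =>
    rw [pvBits_succ, List.replicate_succ] at h
    obtain ⟨h1, h2⟩ := List.cons.inj h
    have hk : k % 2 = 1 := by exact_mod_cast h1
    have := ih (k / 2) h2
    have h2 : 2 ^ (n + 1) = 2 * 2 ^ n := by ring
    omega

theorem pvFirstZero_none (n k : Nat) (h : pvFirstZero (pvBits n k) = none) :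
    pvBits n k = List.replicate n 1 := by
  induction n generalizing k with
  | zero => simp [pvBits]
  | succ n ih =>
    rw [pvBits_succ] at h ⊢
    simp only [pvFirstZero] at h
    by_cases h0 : ((k % 2 : Nat) : Int) = 0
    · rw [if_pos h0] at h
      exact absurd h (by simp)
    · rw [if_neg h0, Option.map_eq_none_iff] at h
      have hk : k % 2 = 1 := by omega
      rw [List.replicate_succ, hk, ih _ h]
      norm_num

theorem pvStep_cons_zero (rest : List Int) : pvStep (0 :: rest) = 1 :: rest := by
  simp [pvStep, pvFirstZero]

theorem pvStep_cons_one (rest : List Int) (h : (pvFirstZero rest).isSome) :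
    pvStep (1 :: rest) = 0 :: pvStep rest := by
  obtain ⟨j, hj⟩ := Option.isSome_iff_exists.mp h
  simp [pvStep, pvFirstZero, hj, List.replicate_succ]

theorem pvStep_bits (n k : Nat) (h : k < 2 ^ n - 1) :
    pvStep (pvBits n k) = pvBits n (k + 1) := by
  induction n generalizing k with
  | zero => omega
  | succ n ih =>
    have h2n : (0:Nat) < 2 ^ n := Nat.two_pow_pos n
    rw [pvBits_succ, pvBits_succ]
    by_cases he : k % 2 = 0
    · rw [he, show (k + 1) % 2 = 1 from by omega, show (k + 1) / 2 = k / 2 from by omega,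
        Nat.cast_zero, Nat.cast_one, pvStep_cons_zero]
    · have ho : k % 2 = 1 := by omega
      have hlt : k / 2 < 2 ^ n - 1 := by
        have : 2 ^ (n + 1) = 2 * 2 ^ n := by ring
        omega
      have hsome : (pvFirstZero (pvBits n (k / 2))).isSome := by
        cases hfz : pvFirstZero (pvBits n (k / 2)) with
        | none =>
          have := pvBits_allones n (k / 2) (pvFirstZero_none n (k / 2) hfz)
          omega
        | some j => simp
      rw [ho, show (k + 1) % 2 = 0 from by omega, show (k + 1) / 2 = k / 2 + 1 from by omega,
        Nat.cast_one, Nat.cast_zero, pvStep_cons_one _ hsome, ih _ hlt]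

theorem pvBits_pred (n : Nat) : pvBits n (2 ^ n - 1) = List.replicate n 1 := by
  induction n with
  | zero => simp [pvBits]
  | succ n ih =>
    have h2 : 2 ^ (n + 1) = 2 * 2 ^ n := by ring
    have h2n : (0:Nat) < 2 ^ n := Nat.two_pow_pos n
    rw [pvBits_succ, show (2 ^ (n + 1) - 1) % 2 = 1 from by omega,
      show (2 ^ (n + 1) - 1) / 2 = 2 ^ n - 1 from by omega, ih, List.replicate_succ]
    norm_num

theorem pvBits_ne_allones (n k : Nat) (h : k < 2 ^ n - 1) :
    pvBits n k ≠ List.replicate n 1 := by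
  intro hc
  have := pvBits_allones n k hc
  omega

theorem pvLoopA_bits (n : Nat) : ∀ (f k : Nat) (acc : List (List Int)),
    k < 2 ^ n → 2 ^ n - 1 - k ≤ f →
    pvLoopA f (List.replicate n 1) (pvBits n k) (pvBits n k) acc
      = acc ++ (List.range' (k + 1) (2 ^ n - 1 - k)).map (pvBits n) := by
  intro f
  induction f with
  | zero =>
    intro k acc hk hf
    have : 2 ^ n - 1 - k = 0 := by omega
    simp [pvLoopA, this]
  | succ f ih =>
    intro k acc hk hf
    by_cases hend : k = 2 ^ n - 1
    · have heq : pvBits n k = List.replicate n 1 := hend ▸ pvBits_pred n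
      rw [heq]
      simp [pvLoopA, hend]
    · have hlt : k < 2 ^ n - 1 := by omega
      rw [pvLoopA, if_pos (pvBits_ne_allones n k hlt), pvStep_bits n k hlt]
      rw [ih (k + 1) _ (by omega) (by omega)]
      have : 2 ^ n - 1 - k = (2 ^ n - 1 - (k + 1)) + 1 := by omega
      rw [this, List.range'_succ]
      simp

theorem pvRange_map_const (a b : Int) (c : Int) :
    (PySem.List.pyRange a b 1).map (fun _ => c) = List.replicate (b - a).toNat c := by
  rw [PySem.List.pyRange_one, List.map_map]
  simp [List.map_const', Function.comp_def]

theorem binary_count_eq (number_of_bit : Int) (h : 0 ≤ number_of_bit) :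
    binary_count number_of_bit
      = (List.range' 1 (2 ^ number_of_bit.toNat - 1)).map (pvBits number_of_bit.toNat) := by
  unfold binary_count
  rw [pvRange_map_const, pvRange_map_const, show (number_of_bit - 0).toNat = number_of_bit.toNat from by omega,
    ← pvBits_zero]
  have hk : 0 < 2 ^ number_of_bit.toNat := Nat.two_pow_pos _
  have hf : 2 ^ number_of_bit.toNat - 1 - 0 ≤ 2 ^ number_of_bit.toNat := by omega
  have := pvLoopA_bits number_of_bit.toNat (2 ^ number_of_bit.toNat) 0 [] hk hf
  simpa using this

theorem binary_count_alt_eq (number_of_bit : Int) (h : 0 < number_of_bit) :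
    binary_count_alt number_of_bit
      = (List.range' 1 (2 ^ number_of_bit.toNat - 1)).map (pvBits number_of_bit.toNat) := by
  have hcast : ((2:Int) ^ number_of_bit.toNat) = ((2 ^ number_of_bit.toNat : Nat) : Int) := by
    push_cast; ring
  unfold binary_count_alt
  rw [if_neg (by omega), List.range'_eq_map_range]
  simp only [PySem.List.pyRange_one, hcast, List.map_map]
  have hM : (((2 ^ number_of_bit.toNat : Nat) : Int) - 1).toNat = 2 ^ number_of_bit.toNat - 1 := by
    omega
  have hn : (number_of_bit - 0).toNat = number_of_bit.toNat := by omega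
  rw [hM, hn]
  apply List.map_congr_left
  intro j _
  simp only [Function.comp_def, pvBits]
  apply List.map_congr_left
  intro i _
  have h1 : ((0:Int) + (i:Int)).toNat = i := by omega
  have h2 : (1:Int) + (j:Int) = ((1 + j : Nat) : Int) := by push_cast; ring
  rw [h1, h2, show ((2:Int) ^ i) = ((2 ^ i : Nat) : Int) from by push_cast; ring,
    PySem.Int.floordiv_natCast]
  exact_mod_cast PySem.Int.mod_natCast _ 2

theorem binary_count_spec : Claim_equal_binary_count := by
  intro number_of_bit hDom
  unfold Spec_binary_count
  by_cases hpos : number_of_bit ≤ 0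
  · unfold binary_count binary_count_alt
    rw [PySem.List.pyRange_one_eq_nil hpos, if_pos hpos,
      show number_of_bit.toNat = 0 from by omega]
    simp [pvLoopA]
  · rw [binary_count_eq number_of_bit (by omega), binary_count_alt_eq number_of_bit (by omega)]
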